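-- pv_equiv track=rewrite | github.com/cezar-r/weedipedia | src/datamanager.py | get_pcts
-- ===== SOURCE A (Python) =====
-- def get_pcts(pct_string): # 'THC: 1%, CBD: 15%'
-- 	pct_string_split = pct_string.split(', ') # ['THC: 1%', 'CBD: 15%']
-- 	thc_pct, cbd_pct, cbn_pct, = '-', '-', '-'
-- 	for pct in pct_string_split:
-- 		if pct[:3] == 'THC':
-- 			thc_pct = pct[4:]
-- 		elif pct[:3] == 'CBD':
-- 			cbd_pct = pct[4:]
-- 		elif pct[:3] == 'CBN':
-- 			cbn_pct = pct[4:]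
-- 	return thc_pct, cbd_pct, cbn_pct
-- ===== SOURCE B (Python) =====
-- def get_pcts(pct_string):
--     parts = pct_string.split(', ')
--     def last_match(tag):
--         for p in reversed(parts):
--             if p[:3] == tag:
--                 return p[4:]
--         return '-'
--     return last_match('THC'), last_match('CBD'), last_match('CBN')
-- ===== Notes on version B (the rewrite author's own statement) =====
-- stated objective: alternative
-- what changed: Instead of one forward pass mutating three accumulators via an elif chain, B makes three independent backward scans (reversed list, early return at the first hit), exploiting that last-assignment-wins equals first-match-from-the-end.
import Mathlib
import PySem

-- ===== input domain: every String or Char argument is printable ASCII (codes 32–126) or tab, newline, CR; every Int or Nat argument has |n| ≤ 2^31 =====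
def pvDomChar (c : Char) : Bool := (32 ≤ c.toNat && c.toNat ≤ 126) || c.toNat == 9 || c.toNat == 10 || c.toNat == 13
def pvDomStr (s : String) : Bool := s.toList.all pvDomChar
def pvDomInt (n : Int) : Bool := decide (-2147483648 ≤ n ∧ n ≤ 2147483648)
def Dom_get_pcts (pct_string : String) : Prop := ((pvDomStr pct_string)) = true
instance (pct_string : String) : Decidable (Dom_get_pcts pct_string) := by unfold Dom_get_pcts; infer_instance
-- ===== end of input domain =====

-- B replaces A's single forward pass with three mutable accumulators by three
-- independent backward scans over the split parts, each returning at the first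
-- matching 3-char prefix (last-assignment-wins = first-match-from-the-end); alternative, same cost.

-- ===== PORT A =====
def get_pcts (pct_string : String) : String × String × String :=
  let pct_string_split := (PySem.Str.split? pct_string ", ").getD []
  pct_string_split.foldl
    (fun (s : String × String × String) pct =>
      if PySem.Str.slice pct none (some 3) = "THC" then
        (PySem.Str.slice pct (some 4) none, s.2.1, s.2.2)
      else if PySem.Str.slice pct none (some 3) = "CBD" then
        (s.1, PySem.Str.slice pct (some 4) none, s.2.2)
      else if PySem.Str.slice pct none (some 3) = "CBN" then
        (s.1, s.2.1, PySem.Str.slice pct (some 4) none)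
      else s)
    ("-", "-", "-")

-- ===== PORT B =====
-- the 'for p in reversed(parts): if p[:3]==tag: return p[4:]' loop, as structural recursion
def lastMatch (tag : String) : List String → String
  | [] => "-"
  | p :: ps =>
    if PySem.Str.slice p none (some 3) = tag then PySem.Str.slice p (some 4) none
    else lastMatch tag ps

def get_pcts_alt (pct_string : String) : String × String × String :=
  let parts := (PySem.Str.split? pct_string ", ").getD []
  (lastMatch "THC" parts.reverse, lastMatch "CBD" parts.reverse, lastMatch "CBN" parts.reverse)

-- ===== PRECONDITION & SPEC =====
def Spec_get_pcts (pct_string : String) (out : String × String × String) : Prop := out = get_pcts_alt pct_string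
instance (pct_string : String) (out : String × String × String) : Decidable (Spec_get_pcts pct_string out) := by unfold Spec_get_pcts; infer_instance

-- ===== CLAIM (what is proved, stated in full; the proofs are below) =====
def Claim_equal_get_pcts : Prop := ∀ (pct_string : String), Dom_get_pcts pct_string → Spec_get_pcts pct_string (get_pcts pct_string)

-- ===== LEMMAS AND PROOFS =====
-- lastMatch with an explicit default (proof-side generalisation of lastMatch)
def lastMatchD (tag d : String) : List String → String
  | [] => d
  | p :: ps =>
    if PySem.Str.slice p none (some 3) = tag then PySem.Str.slice p (some 4) none
    else lastMatchD tag d ps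

theorem lastMatchD_dash (tag : String) (l : List String) :
    lastMatchD tag "-" l = lastMatch tag l := by
  induction l with
  | nil => rfl
  | cons p ps ih => simp [lastMatchD, lastMatch, ih]

theorem lastMatchD_append (tag d p : String) (l : List String) :
    lastMatchD tag d (l ++ [p])
      = lastMatchD tag (if PySem.Str.slice p none (some 3) = tag
                        then PySem.Str.slice p (some 4) none else d) l := by
  induction l with
  | nil => simp [lastMatchD]
  | cons q qs ih => simp only [List.cons_append, lastMatchD, ih]

theorem get_pcts_fold_invariant (ps : List String) (acc : String × String × String) :
    ps.foldl
      (fun (s : String × String × String) pct =>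
        if PySem.Str.slice pct none (some 3) = "THC" then
          (PySem.Str.slice pct (some 4) none, s.2.1, s.2.2)
        else if PySem.Str.slice pct none (some 3) = "CBD" then
          (s.1, PySem.Str.slice pct (some 4) none, s.2.2)
        else if PySem.Str.slice pct none (some 3) = "CBN" then
          (s.1, s.2.1, PySem.Str.slice pct (some 4) none)
        else s)
      acc
    = (lastMatchD "THC" acc.1 ps.reverse,
       lastMatchD "CBD" acc.2.1 ps.reverse,
       lastMatchD "CBN" acc.2.2 ps.reverse) := by
  induction ps generalizing acc with
  | nil => rfl
  | cons p ps ih =>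
    simp only [List.foldl_cons, List.reverse_cons, lastMatchD_append]
    rw [ih]
    by_cases h1 : PySem.Str.slice p none (some 3) = "THC"
    · simp [h1]
    · by_cases h2 : PySem.Str.slice p none (some 3) = "CBD"
      · simp [h2]
      · by_cases h3 : PySem.Str.slice p none (some 3) = "CBN"
        · simp [h3]
        · simp [h1, h2, h3]

-- ===== VERDICT (by name: the statement is the Claim_ definition above) =====
theorem get_pcts_spec : Claim_equal_get_pcts := by
  intro s _
  unfold Spec_get_pcts get_pcts get_pcts_alt
  rw [get_pcts_fold_invariant]
  simp [lastMatchD_dash]
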